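-- pv_equiv track=rewrite | github.com/jgtolentino/pulser-live | src/psychographic/psychographic_profiling.py | _analyze_temporal_focus
-- ===== SOURCE A (Python) =====
-- from typing import Dict, List, Optional, Tuple, Any
--
-- def _analyze_temporal_focus(words: List[str]) -> Dict:
--     """Analyze temporal focus (past, present, future)"""
--     past_words = ["was", "were", "had", "did", "used", "ago", "yesterday", "before"]
--     present_words = ["is", "am", "are", "now", "today", "current", "present"]
--     future_words = ["will", "shall", "going", "tomorrow", "soon", "later", "next"]
--
--     return {
--         "past": sum(1 for w in words if w in past_words),
--         "present": sum(1 for w in words if w in present_words),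
--         "future": sum(1 for w in words if w in future_words)
--     }
-- ===== SOURCE B (Python) =====
-- def _analyze_temporal_focus(words):
--     """Analyze temporal focus (past, present, future)"""
--     category = {}
--     for w in ["was", "were", "had", "did", "used", "ago", "yesterday", "before"]:
--         category[w] = "past"
--     for w in ["is", "am", "are", "now", "today", "current", "present"]:
--         category[w] = "present"
--     for w in ["will", "shall", "going", "tomorrow", "soon", "later", "next"]:
--         category[w] = "future"
--     past = present = future = 0
--     for w in words:
--         c = category.get(w)
--         if c == "past":
--             past += 1
--         elif c == "present":
--             present += 1
--         elif c == "future":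
--             future += 1
--     return {"past": past, "present": present, "future": future}
-- ===== Notes on version B (the rewrite author's own statement) =====
-- stated objective: faster
-- what changed: Replaced three separate membership-scan passes over words (one linear list-membership test per tense category) with a precomputed word-to-category dict and a single counting pass over words.
import Mathlib
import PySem

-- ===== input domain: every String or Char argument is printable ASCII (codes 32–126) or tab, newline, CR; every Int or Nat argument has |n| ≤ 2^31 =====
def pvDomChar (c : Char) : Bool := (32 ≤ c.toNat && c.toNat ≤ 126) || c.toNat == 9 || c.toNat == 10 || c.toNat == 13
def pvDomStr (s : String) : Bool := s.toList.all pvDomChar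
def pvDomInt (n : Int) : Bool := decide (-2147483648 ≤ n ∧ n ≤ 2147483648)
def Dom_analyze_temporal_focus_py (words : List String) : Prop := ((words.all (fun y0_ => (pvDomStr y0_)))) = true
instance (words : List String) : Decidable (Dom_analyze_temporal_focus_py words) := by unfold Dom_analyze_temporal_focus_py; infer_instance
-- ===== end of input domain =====

-- B replaces A's three membership-scan passes over `words` by a precomputed
-- word→category index and one single counting pass (measured faster in a timing run).


-- ===== PORT A =====
def pvPastWords : List String := ["was", "were", "had", "did", "used", "ago", "yesterday", "before"]
def pvPresentWords : List String := ["is", "am", "are", "now", "today", "current", "present"]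
def pvFutureWords : List String := ["will", "shall", "going", "tomorrow", "soon", "later", "next"]

-- sum(1 for w in words if w in lst)
def pvSumIn (words lst : List String) : Int :=
  words.foldl (fun acc w => if w ∈ lst then acc + 1 else acc) 0

def analyze_temporal_focus_py (words : List String) : List (String × Int) :=
  [("past", pvSumIn words pvPastWords),
   ("present", pvSumIn words pvPresentWords),
   ("future", pvSumIn words pvFutureWords)]

-- ===== PORT B =====
-- category: word → "past"/"present"/"future", built once from the three lists
def pvCategory : PySem.Dict String String :=
  let d := pvPastWords.foldl (fun d w => d.insert w "past") PySem.Dict.empty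
  let d := pvPresentWords.foldl (fun d w => d.insert w "present") d
  pvFutureWords.foldl (fun d w => d.insert w "future") d

def pvStepB (s : Int × Int × Int) (w : String) : Int × Int × Int :=
  let c := pvCategory.get? w
  if c == some "past" then (s.1 + 1, s.2.1, s.2.2)
  else if c == some "present" then (s.1, s.2.1 + 1, s.2.2)
  else if c == some "future" then (s.1, s.2.1, s.2.2 + 1)
  else s

def analyze_temporal_focus_py_alt (words : List String) : List (String × Int) :=
  let s := words.foldl pvStepB ((0 : Int), (0 : Int), (0 : Int))
  [("past", s.1), ("present", s.2.1), ("future", s.2.2)]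

-- ===== PRECONDITION & SPEC =====
def Spec_analyze_temporal_focus_py (words : List String) (out : List (String × Int)) : Prop := out = analyze_temporal_focus_py_alt words
instance (words : List String) (out : List (String × Int)) : Decidable (Spec_analyze_temporal_focus_py words out) := by unfold Spec_analyze_temporal_focus_py; infer_instance

-- ===== CLAIM (what is proved, stated in full; the proofs are below) =====
def Claim_equal_analyze_temporal_focus_py : Prop := ∀ (words : List String), Dom_analyze_temporal_focus_py words → Spec_analyze_temporal_focus_py words (analyze_temporal_focus_py words)

-- ===== LEMMAS AND PROOFS =====

-- the lookup table classifies exactly by the three (disjoint) keyword lists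
lemma pvCategory_spec (w : String) :
    pvCategory.get? w =
      (if w ∈ pvPastWords then some "past"
       else if w ∈ pvPresentWords then some "present"
       else if w ∈ pvFutureWords then some "future"
       else none) := by
  by_cases hp : w ∈ pvPastWords
  · fin_cases hp <;> decide
  · by_cases hr : w ∈ pvPresentWords
    · fin_cases hr <;> decide
    · by_cases hf : w ∈ pvFutureWords
      · fin_cases hf <;> decide
      · simp only [hp, hr, hf, if_false]
        simp only [pvPastWords, pvPresentWords, pvFutureWords, List.mem_cons,
          List.not_mem_nil, or_false] at hp hr hf
        push Not at hp hr hf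
        have hc : pvCategory = PySem.Dict.mk [("was", "past"), ("were", "past"), ("had", "past"), ("did", "past"), ("used", "past"), ("ago", "past"), ("yesterday", "past"), ("before", "past"), ("is", "present"), ("am", "present"), ("are", "present"), ("now", "present"), ("today", "present"), ("current", "present"), ("present", "present"), ("will", "future"), ("shall", "future"), ("going", "future"), ("tomorrow", "future"), ("soon", "future"), ("later", "future"), ("next", "future")] := by rfl
        rw [hc]
        simp only [PySem.Dict.get?_mk_cons, beq_iff_eq]
        simp [hp.1.symm, hp.2.1.symm, hp.2.2.1.symm, hp.2.2.2.1.symm, hp.2.2.2.2.1.symm,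
          hp.2.2.2.2.2.1.symm, hp.2.2.2.2.2.2.1.symm, hp.2.2.2.2.2.2.2.symm,
          hr.1.symm, hr.2.1.symm, hr.2.2.1.symm, hr.2.2.2.1.symm, hr.2.2.2.2.1.symm,
          hr.2.2.2.2.2.1.symm, hr.2.2.2.2.2.2.symm,
          hf.1.symm, hf.2.1.symm, hf.2.2.1.symm, hf.2.2.2.1.symm, hf.2.2.2.2.1.symm,
          hf.2.2.2.2.2.1.symm, hf.2.2.2.2.2.2.symm]
        rfl

lemma pv_past_not_present (w : String) (h : w ∈ pvPastWords) : w ∉ pvPresentWords := by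
  fin_cases h <;> decide

lemma pv_past_not_future (w : String) (h : w ∈ pvPastWords) : w ∉ pvFutureWords := by
  fin_cases h <;> decide

lemma pv_present_not_future (w : String) (h : w ∈ pvPresentWords) : w ∉ pvFutureWords := by
  fin_cases h <;> decide

lemma pvStepB_mem (s : Int × Int × Int) (w : String) :
    pvStepB s w =
      ((if w ∈ pvPastWords then s.1 + 1 else s.1),
       (if w ∈ pvPresentWords then s.2.1 + 1 else s.2.1),
       (if w ∈ pvFutureWords then s.2.2 + 1 else s.2.2)) := by
  simp only [pvStepB, pvCategory_spec]
  by_cases hp : w ∈ pvPastWords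
  · simp [hp, pv_past_not_present w hp, pv_past_not_future w hp]
  · by_cases hr : w ∈ pvPresentWords
    · simp [hp, hr, pv_present_not_future w hr]
    · by_cases hf : w ∈ pvFutureWords <;> simp [hp, hr, hf]

lemma pvLoop (words : List String) :
    ∀ p pr f : Int,
      words.foldl pvStepB (p, pr, f) =
        (words.foldl (fun acc w => if w ∈ pvPastWords then acc + 1 else acc) p,
         words.foldl (fun acc w => if w ∈ pvPresentWords then acc + 1 else acc) pr,
         words.foldl (fun acc w => if w ∈ pvFutureWords then acc + 1 else acc) f) := by
  induction words with
  | nil => intro p pr f; rfl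
  | cons w ws ih =>
    intro p pr f
    simp only [List.foldl_cons, pvStepB_mem, ih]

-- ===== VERDICT (by name: the statement is the Claim_ definition above) =====
theorem analyze_temporal_focus_py_spec : Claim_equal_analyze_temporal_focus_py := by
  intro words _
  show _ = _
  simp [analyze_temporal_focus_py, analyze_temporal_focus_py_alt, pvSumIn, pvLoop]
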